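-- pv_equiv track=rewrite | github.com/abiwardanii/python-fundamental | exercises/69.py | sum_69
-- ===== SOURCE A (Python) =====
-- def sum_69(arr):
--     hasil = 0
--     add = True
--
--     for num in arr:
--         while add:
--             if num != 6:
--                 hasil += num
--                 break
--             else:
--                 add = False
--         while not add:
--             if num != 9:
--                 break
--             else:
--                 add = True
--                 break
--     return hasil
-- ===== SOURCE B (Python) =====
-- def sum_69(arr):
--     # Works on a copy; repeatedly deletes each 6..9 segment by index search, then sums.
--     lst = list(arr)
--     while 6 in lst:
--         i = lst.index(6)
--         tail = lst[i + 1:]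
--         if 9 in tail:
--             lst = lst[:i] + tail[tail.index(9) + 1:]
--         else:
--             lst = lst[:i]
--     return sum(lst)
-- ===== Notes on version B (the rewrite author's own statement) =====
-- stated objective: alternative
-- what changed: Replaces A's single-pass boolean state machine with repeated find-and-delete of 6..9 segments on a list copy, summing the remainder.
import Mathlib
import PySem

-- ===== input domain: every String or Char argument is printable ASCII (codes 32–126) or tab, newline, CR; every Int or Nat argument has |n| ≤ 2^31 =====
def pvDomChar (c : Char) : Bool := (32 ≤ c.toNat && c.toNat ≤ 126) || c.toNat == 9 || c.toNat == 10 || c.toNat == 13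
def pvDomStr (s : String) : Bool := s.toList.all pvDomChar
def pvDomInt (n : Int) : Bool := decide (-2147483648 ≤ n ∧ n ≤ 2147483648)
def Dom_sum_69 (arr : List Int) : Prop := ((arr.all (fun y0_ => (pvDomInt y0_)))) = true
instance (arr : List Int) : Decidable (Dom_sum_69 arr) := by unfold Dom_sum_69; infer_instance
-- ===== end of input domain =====

-- B replaces A's one-pass boolean state machine by repeated find-and-delete of 6..9
-- segments on a list copy (objective: alternative decomposition; return value only,
-- neither version mutates its argument).

-- ===== PORT A =====
-- one iteration of A's for-loop body: the two inner while-loops each run at most once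
def sum69StepA (s : Int × Bool) (num : Int) : Int × Bool :=
  let hasil := s.1
  let add := s.2
  -- 'while add:' body (runs once: every branch breaks or clears add)
  let s1 : Int × Bool :=
    if add then (if num ≠ 6 then (hasil + num, add) else (hasil, false)) else (hasil, add)
  -- 'while not add:' body (runs once: both branches break)
  if ¬ s1.2 then (if num ≠ 9 then s1 else (s1.1, true)) else s1

def sum_69 (arr : List Int) : Int :=
  (arr.foldl sum69StepA (0, true)).1

-- ===== PORT B =====
-- the 'while 6 in lst' loop of Source B; slices lst[:i], lst[i+1:], tail[j+1:] have
-- nonnegative in-range starts/stops, so List.take/List.drop are exact here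
def sum69AltLoop (lst : List Int) : List Int :=
  match h : PySem.List.index? lst 6 with
  | none => lst
  | some i =>
    let tail := lst.drop (i + 1)
    match PySem.List.index? tail 9 with
    | some j => sum69AltLoop (lst.take i ++ tail.drop (j + 1))
    | none => sum69AltLoop (lst.take i)
termination_by lst.length
decreasing_by
  · obtain ⟨hk, -, -⟩ := PySem.List.getElem_of_index?_eq_some h
    simp [List.length_take, List.length_drop]
    omega
  · obtain ⟨hk, -, -⟩ := PySem.List.getElem_of_index?_eq_some h
    simp [List.length_take]
    omega

def sum_69_alt (arr : List Int) : Int :=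
  (sum69AltLoop arr).sum

-- ===== PRECONDITION & SPEC =====
def Spec_sum_69 (arr : List Int) (out : Int) : Prop := out = sum_69_alt arr
instance (arr : List Int) (out : Int) : Decidable (Spec_sum_69 arr out) := by unfold Spec_sum_69; infer_instance

-- ===== CLAIM (what is proved, stated in full; the proofs are below) =====
def Claim_equal_sum_69 : Prop := ∀ (arr : List Int), Dom_sum_69 arr → Spec_sum_69 arr (sum_69 arr)

-- ===== LEMMAS AND PROOFS =====

-- reference recursion: g = "summing" state (add = True), gskip = "skipping" state
mutual
def sum69G : List Int → Int
  | [] => 0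
  | x :: xs => if x = 6 then sum69Gskip xs else x + sum69G xs
def sum69Gskip : List Int → Int
  | [] => 0
  | x :: xs => if x = 9 then sum69G xs else sum69Gskip xs
end

-- A's fold realises sum69G / sum69Gskip depending on the incoming add flag
theorem foldA_eq (xs : List Int) : ∀ h : Int,
    (xs.foldl sum69StepA (h, true)).1 = h + sum69G xs ∧
    (xs.foldl sum69StepA (h, false)).1 = h + sum69Gskip xs := by
  induction xs with
  | nil => intro h; simp [sum69G, sum69Gskip]
  | cons x xs ih =>
    intro h
    constructor
    · by_cases hx : x = 6
      · simp [List.foldl_cons, sum69StepA, hx, sum69G, (ih h).2]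
      · simp [List.foldl_cons, sum69StepA, hx, sum69G, (ih (h + x)).1]
        ring
    · by_cases hx : x = 9
      · simp [List.foldl_cons, sum69StepA, hx, sum69Gskip, (ih h).1]
      · simp [List.foldl_cons, sum69StepA, hx, sum69Gskip, (ih h).2]

theorem sum69G_append (pre rest : List Int) (hp : (6 : Int) ∉ pre) :
    sum69G (pre ++ rest) = pre.sum + sum69G rest := by
  induction pre with
  | nil => simp
  | cons x xs ih =>
    simp only [List.mem_cons, not_or] at hp
    have hx : x ≠ 6 := fun e => hp.1 e.symm
    simp [sum69G, hx, ih hp.2]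
    ring

theorem sum69Gskip_append (p rest : List Int) (hp : (9 : Int) ∉ p) :
    sum69Gskip (p ++ rest) = sum69Gskip rest := by
  induction p with
  | nil => simp
  | cons x xs ih =>
    simp only [List.mem_cons, not_or] at hp
    have hx : x ≠ 9 := fun e => hp.1 e.symm
    simp [sum69Gskip, hx, ih hp.2]

theorem sum69Gskip_no9 (p : List Int) (hp : (9 : Int) ∉ p) : sum69Gskip p = 0 := by
  simpa using sum69Gskip_append p [] hp

theorem sum69AltLoop_sum (lst : List Int) : (sum69AltLoop lst).sum = sum69G lst := by
  induction lst using sum69AltLoop.induct with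
  | case1 lst h =>
    rw [sum69AltLoop, h]
    rw [PySem.List.index?_eq_none_iff] at h
    simpa [sum69G] using (sum69G_append lst [] h).symm
  | case2 lst i h tail j h2 ih =>
    rw [sum69AltLoop, h]
    simp only []
    rw [show lst.drop (i+1) = tail from rfl, h2]
    obtain ⟨pre, suf, hsplit, hlen, hnot6⟩ := (PySem.List.index?_eq_some_iff lst 6 i).mp h
    have htail : tail = suf := by
      simp [show tail = lst.drop (i+1) from rfl, hsplit, ← hlen, List.drop_append]
    obtain ⟨p2, s2, hsplit2, hlen2, hnot9⟩ := (PySem.List.index?_eq_some_iff tail 9 j).mp h2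
    have htake : lst.take i = pre := by
      simp [hsplit, ← hlen]
    have hdrop : tail.drop (j + 1) = s2 := by
      simp [hsplit2, ← hlen2, List.drop_append]
    rw [htake] at ih ⊢
    rw [hdrop] at ih
    show (sum69AltLoop (pre ++ tail.drop (j + 1))).sum = sum69G lst
    rw [hdrop]
    rw [ih, hsplit, sum69G_append pre _ hnot6, sum69G_append pre _ hnot6]
    have : sum69G (6 :: suf) = sum69Gskip suf := by simp [sum69G]
    rw [this, htail] at *
    rw [hsplit2, sum69Gskip_append p2 _ hnot9]
    simp [sum69Gskip]
  | case3 lst i h tail h2 ih =>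
    rw [sum69AltLoop, h]
    simp only []
    rw [show lst.drop (i+1) = tail from rfl, h2]
    obtain ⟨pre, suf, hsplit, hlen, hnot6⟩ := (PySem.List.index?_eq_some_iff lst 6 i).mp h
    have htail : tail = suf := by
      simp [show tail = lst.drop (i+1) from rfl, hsplit, ← hlen, List.drop_append]
    have htake : lst.take i = pre := by
      simp [hsplit, ← hlen]
    rw [htake] at ih ⊢
    rw [ih, hsplit, sum69G_append pre _ hnot6]
    have h9 : (9 : Int) ∉ suf := by
      rw [← htail, ← PySem.List.index?_eq_none_iff]; exact h2
    have : sum69G (6 :: suf) = sum69Gskip suf := by simp [sum69G]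
    rw [this, sum69Gskip_no9 suf h9]
    simpa [sum69G] using sum69G_append pre [] hnot6

-- ===== VERDICT (by name: the statement is the Claim_ definition above) =====
theorem sum_69_spec : Claim_equal_sum_69 := by
  intro arr _
  show sum_69 arr = sum_69_alt arr
  rw [sum_69, sum_69_alt, (foldA_eq arr 0).1, sum69AltLoop_sum arr]
  ring
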